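-- pv_equiv track=rewrite | github.com/pranitha275/Tavily_OpenAI_Pipeline | app.py | categorize_insights
-- ===== SOURCE A (Python) =====
-- def categorize_insights(results):
--     start, stop, more = [], [], []
--
--     start_keywords = [
--         "start", "begin", "adopt", "introduce", "implement", "test", "try", "shift to", "invest in",
--         "emerging", "growing", "trending", "gain traction", "recommended", "explore", "launch", "expand into",
--         "rising", "new approach", "entering", "pilot program", "top strategy", "initiating", "successful trend"
--     ]
--     stop_keywords = [
--         "stop", "avoid", "drop", "decline", "decrease", "ineffective", "no longer working", "not working",
--         "falling behind", "obsolete", "outdated", "retire", "phase out", "abandon", "cancel", "discontinue",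
--         "low ROI", "wasteful", "negative impact", "underperforming", "cut back on"
--     ]
--     more_keywords = [
--         "scale", "expand", "double down", "increase", "focus more", "optimize", "enhance", "accelerate",
--         "repeat", "continue", "maximize", "boost", "proven", "successful", "keep doing", "improve",
--         "strong results", "continue investing", "do more of", "build on", "capitalize on", "replicate"
--     ]
--
--     for res in results["results"][:5]:
--         content = res.get("content", "").lower()
--         if any(kw in content for kw in start_keywords): start.append(res)
--         if any(kw in content for kw in stop_keywords): stop.append(res)
--         if any(kw in content for kw in more_keywords): more.append(res)
--
--     return start[:1], stop[:1], more[:1]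
-- ===== SOURCE B (Python) =====
-- def categorize_insights(results):
--     start_keywords = [
--         "start", "begin", "adopt", "introduce", "implement", "test", "try", "shift to", "invest in",
--         "emerging", "growing", "trending", "gain traction", "recommended", "explore", "launch", "expand into",
--         "rising", "new approach", "entering", "pilot program", "top strategy", "initiating", "successful trend"
--     ]
--     stop_keywords = [
--         "stop", "avoid", "drop", "decline", "decrease", "ineffective", "no longer working", "not working",
--         "falling behind", "obsolete", "outdated", "retire", "phase out", "abandon", "cancel", "discontinue",
--         "low ROI", "wasteful", "negative impact", "underperforming", "cut back on"
--     ]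
--     more_keywords = [
--         "scale", "expand", "double down", "increase", "focus more", "optimize", "enhance", "accelerate",
--         "repeat", "continue", "maximize", "boost", "proven", "successful", "keep doing", "improve",
--         "strong results", "continue investing", "do more of", "build on", "capitalize on", "replicate"
--     ]
--
--     top = results["results"][:5]
--
--     def first_match(keywords):
--         for res in top:
--             content = res.get("content", "").lower()
--             if any(kw in content for kw in keywords):
--                 return [res]
--         return []
--
--     return first_match(start_keywords), first_match(stop_keywords), first_match(more_keywords)
-- ===== Notes on version B (the rewrite author's own statement) =====
-- stated objective: alternative
-- what changed: A makes one combined pass over the top-5 results testing all three keyword lists per item and truncating each accumulated list to one element at the end; B instead scans the sliced results three independent times, once per keyword category, returning the first matching result directly.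
import Mathlib
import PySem

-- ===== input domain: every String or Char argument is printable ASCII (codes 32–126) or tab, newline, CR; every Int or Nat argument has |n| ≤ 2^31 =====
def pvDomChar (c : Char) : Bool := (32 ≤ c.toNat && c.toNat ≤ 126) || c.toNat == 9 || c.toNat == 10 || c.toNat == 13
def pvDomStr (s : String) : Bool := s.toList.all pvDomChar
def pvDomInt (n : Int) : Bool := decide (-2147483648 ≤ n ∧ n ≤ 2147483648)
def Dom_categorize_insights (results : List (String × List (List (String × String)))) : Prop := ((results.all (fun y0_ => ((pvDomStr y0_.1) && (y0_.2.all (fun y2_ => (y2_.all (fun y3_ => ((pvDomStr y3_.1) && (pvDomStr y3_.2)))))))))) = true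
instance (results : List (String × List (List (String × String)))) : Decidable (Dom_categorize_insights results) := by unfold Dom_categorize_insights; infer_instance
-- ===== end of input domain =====

-- B replaces A's single three-way classification pass with one independent first-match scan per
-- keyword category (objective: alternative decomposition, same cost).

-- shared keyword data (the literal lists from the Python source)
def pvStartKw : List String := [
  "start", "begin", "adopt", "introduce", "implement", "test", "try", "shift to", "invest in",
  "emerging", "growing", "trending", "gain traction", "recommended", "explore", "launch", "expand into",
  "rising", "new approach", "entering", "pilot program", "top strategy", "initiating", "successful trend"]
def pvStopKw : List String := [
  "stop", "avoid", "drop", "decline", "decrease", "ineffective", "no longer working", "not working",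
  "falling behind", "obsolete", "outdated", "retire", "phase out", "abandon", "cancel", "discontinue",
  "low ROI", "wasteful", "negative impact", "underperforming", "cut back on"]
def pvMoreKw : List String := [
  "scale", "expand", "double down", "increase", "focus more", "optimize", "enhance", "accelerate",
  "repeat", "continue", "maximize", "boost", "proven", "successful", "keep doing", "improve",
  "strong results", "continue investing", "do more of", "build on", "capitalize on", "replicate"]

-- res.get("content", "").lower()
def pvContent (res : List (String × String)) : String :=
  PySem.Str.lower ((PySem.Dict.mk res).getD "content" "")

-- any(kw in content for kw in kws)
def pvHasKw (kws : List String) (content : String) : Bool :=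
  kws.any (fun kw => PySem.Str.isIn kw content)

-- ===== PORT A =====
-- one pass over results["results"][:5], appending to the three lists, then [:1] of each
def pvStepA (acc : List (List (String × String)) × List (List (String × String)) × List (List (String × String)))
    (res : List (String × String)) :
    List (List (String × String)) × List (List (String × String)) × List (List (String × String)) :=
  let content := pvContent res
  let acc1 := if pvHasKw pvStartKw content then (acc.1 ++ [res], acc.2.1, acc.2.2) else acc
  let acc2 := if pvHasKw pvStopKw content then (acc1.1, acc1.2.1 ++ [res], acc1.2.2) else acc1
  if pvHasKw pvMoreKw content then (acc2.1, acc2.2.1, acc2.2.2 ++ [res]) else acc2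

def categorize_insights (results : List (String × List (List (String × String)))) : (List (List (String × String))) × (List (List (String × String))) × (List (List (String × String))) :=
  match (PySem.Dict.mk results).get? "results" with
  | none => ([], [], [])  -- results["results"] raises KeyError: excluded by Pre_
  | some rs =>
    let out := (rs.take 5).foldl pvStepA ([], [], [])
    (out.1.take 1, out.2.1.take 1, out.2.2.take 1)

-- ===== PORT B =====
-- first result (as a one-element list) whose content matches one of the keywords, else []
def pvFirstMatch (kws : List String) : List (List (String × String)) → List (List (String × String))
  | [] => []
  | res :: rest => if pvHasKw kws (pvContent res) then [res] else pvFirstMatch kws rest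

def categorize_insights_alt (results : List (String × List (List (String × String)))) : (List (List (String × String))) × (List (List (String × String))) × (List (List (String × String))) :=
  match (PySem.Dict.mk results).get? "results" with
  | none => ([], [], [])  -- results["results"] raises KeyError: excluded by Pre_
  | some rs =>
    let top := rs.take 5
    (pvFirstMatch pvStartKw top, pvFirstMatch pvStopKw top, pvFirstMatch pvMoreKw top)

-- ===== PRECONDITION & SPEC =====
-- A raises KeyError when the dict has no "results" key; Pre_ excludes exactly those inputs.
def Pre_categorize_insights (results : List (String × List (List (String × String)))) : Prop :=
  "results" ∈ results.map Prod.fst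
instance (results : List (String × List (List (String × String)))) : Decidable (Pre_categorize_insights results) := by unfold Pre_categorize_insights; infer_instance

def pvWitness_categorize_insights : (List (String × List (List (String × String)))) :=
  [("results", [[("content", "we should stop and scale")]])]

def Spec_categorize_insights (results : List (String × List (List (String × String)))) (out : (List (List (String × String))) × (List (List (String × String))) × (List (List (String × String)))) : Prop := out = categorize_insights_alt results
instance (results : List (String × List (List (String × String)))) (out : (List (List (String × String))) × (List (List (String × String))) × (List (List (String × String)))) : Decidable (Spec_categorize_insights results out) := by unfold Spec_categorize_insights; infer_instance

-- ===== CLAIM (what is proved, stated in full; the proofs are below) =====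
def Claim_equal_categorize_insights : Prop := ∀ (results : List (String × List (List (String × String)))), Dom_categorize_insights results → Pre_categorize_insights results → Spec_categorize_insights results (categorize_insights results)

-- ===== LEMMAS AND PROOFS =====

-- A's joint loop computes, per component, the filter of the scanned list
theorem foldl_pvStepA (l : List (List (String × String)))
    (s t m : List (List (String × String))) :
    l.foldl pvStepA (s, t, m) =
      (s ++ l.filter (fun r => pvHasKw pvStartKw (pvContent r)),
       t ++ l.filter (fun r => pvHasKw pvStopKw (pvContent r)),
       m ++ l.filter (fun r => pvHasKw pvMoreKw (pvContent r))) := by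
  induction l generalizing s t m with
  | nil => simp
  | cons r rest ih =>
    simp only [List.foldl_cons, List.filter_cons, pvStepA]
    split_ifs <;> simp [ih]

-- B's scan is take 1 of the same filter
theorem pvFirstMatch_eq_take_one_filter (kws : List String) (l : List (List (String × String))) :
    pvFirstMatch kws l = (l.filter (fun r => pvHasKw kws (pvContent r))).take 1 := by
  induction l with
  | nil => rfl
  | cons r rest ih =>
    simp only [pvFirstMatch, List.filter_cons]
    split_ifs with h <;> simp [ih]

-- ===== VERDICT (by name: the statement is the Claim_ definition above) =====
theorem categorize_insights_spec : Claim_equal_categorize_insights := by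
  intro results _ _
  unfold Spec_categorize_insights categorize_insights categorize_insights_alt
  cases (PySem.Dict.mk results).get? "results" with
  | none => rfl
  | some rs =>
    simp only [foldl_pvStepA, pvFirstMatch_eq_take_one_filter, List.nil_append]
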